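-- pv_equiv track=rewrite | github.com/xiuwencs/berry | code/Apriori.py | modify_list
-- ===== SOURCE A (Python) =====
-- def modify_list(lst):
--     for inner_lst in lst:
--         consecutive_d_count = 0
--         modified_lst = []
--         for element in inner_lst:
--             if element == 'D-':
--                 if consecutive_d_count == 0:
--                     modified_lst.append(element)
--                 consecutive_d_count += 1
--             else:
--                 modified_lst.append(element)
--                 consecutive_d_count = 0
--         inner_lst[:] = modified_lst
--     return lst
-- ===== SOURCE B (Python) =====
-- def modify_list(lst):
--     for inner in lst:
--         new = []
--         i, n = 0, len(inner)
--         while i < n: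
--             j = i
--             while j < n and inner[j] == inner[i]:
--                 j += 1
--             if inner[i] == 'D-':
--                 new.append('D-')
--             else:
--                 new.extend(inner[i:j])
--             i = j
--         inner[:] = new
--     return lst
-- ===== Notes on version B (the rewrite author's own statement) =====
-- stated objective: alternative
-- what changed: B iterates over maximal runs of equal elements (a hand-rolled groupby: scan ahead to the end of each run, emit one 'D-' for a 'D-' run, the whole run otherwise) instead of A's element-by-element loop with a consecutive_d_count counter.
import Mathlib
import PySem

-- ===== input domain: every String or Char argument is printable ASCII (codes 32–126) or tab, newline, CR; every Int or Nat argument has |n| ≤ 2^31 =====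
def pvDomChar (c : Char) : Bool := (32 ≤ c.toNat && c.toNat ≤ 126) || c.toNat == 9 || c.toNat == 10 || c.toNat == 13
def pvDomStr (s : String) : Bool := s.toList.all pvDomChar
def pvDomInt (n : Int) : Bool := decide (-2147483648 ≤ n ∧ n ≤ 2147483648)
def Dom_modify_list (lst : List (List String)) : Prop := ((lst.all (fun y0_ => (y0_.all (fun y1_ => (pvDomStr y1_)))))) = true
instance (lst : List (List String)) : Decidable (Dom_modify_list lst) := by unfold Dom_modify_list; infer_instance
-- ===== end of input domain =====

-- B replaces A's per-element loop with a consecutive_d_count counter by a run-based scan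
-- (hand-rolled groupby): alternative decomposition, same cost. Both programs mutate the
-- inner lists in place in Python; this file proves equality of the RETURN value.

-- ===== PORT A =====
-- inner loop of A: state = (consecutive_d_count, modified_lst)
def mlStepA (s : Int × List String) (e : String) : Int × List String :=
  if e = "D-" then
    (s.1 + 1, if s.1 = 0 then s.2 ++ [e] else s.2)
  else
    (0, s.2 ++ [e])

def mlInnerA (inner : List String) : List String :=
  (inner.foldl mlStepA ((0 : Int), ([] : List String))).2

def modify_list (lst : List (List String)) : List (List String) :=
  lst.map mlInnerA

-- ===== PORT B =====
-- inner while-loop of B: at each step take the maximal run of elements equal to the head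
-- (the inner `while j < n and inner[j] == inner[i]` scan), emit one 'D-' for a 'D-' run,
-- the whole run otherwise, and continue after the run.
def mlInnerB : List String → List String
  | [] => []
  | x :: xs =>
    (if x = "D-" then ["D-"] else x :: xs.takeWhile (· == x)) ++
      mlInnerB (xs.dropWhile (· == x))
termination_by l => l.length
decreasing_by
  have := List.length_dropWhile_le (fun y => y == x) xs
  simp; omega

def modify_list_alt (lst : List (List String)) : List (List String) :=
  lst.map mlInnerB

-- ===== PRECONDITION & SPEC =====
def Spec_modify_list (lst : List (List String)) (out : List (List String)) : Prop := out = modify_list_alt lst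
instance (lst : List (List String)) (out : List (List String)) : Decidable (Spec_modify_list lst out) := by unfold Spec_modify_list; infer_instance

-- ===== CLAIM (what is proved, stated in full; the proofs are below) =====
def Claim_equal_modify_list : Prop := ∀ (lst : List (List String)), Dom_modify_list lst → Spec_modify_list lst (modify_list lst)

-- ===== LEMMAS AND PROOFS =====

-- functional view of A's inner loop, with the counter as first argument
def mlF : Int → List String → List String
  | _, [] => []
  | c, e :: es =>
    if e = "D-" then (if c = 0 then [e] else []) ++ mlF (c + 1) es
    else e :: mlF 0 es

theorem mlFoldA (l : List String) : ∀ (c : Int) (acc : List String),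
    (l.foldl mlStepA (c, acc)).2 = acc ++ mlF c l := by
  induction l with
  | nil => intro c acc; simp [mlF]
  | cons e es ih =>
    intro c acc
    by_cases he : e = "D-" <;> by_cases hc : c = 0 <;>
      simp [mlStepA, mlF, he, hc, ih, List.append_assoc]

-- with a positive counter, mlF skips the leading run of 'D-'
theorem mlF_pos (l : List String) : ∀ c : Int, 0 < c →
    mlF c l = mlF 0 (l.dropWhile (· == "D-")) := by
  induction l with
  | nil => intro c _; simp [mlF]
  | cons e es ih =>
    intro c hc
    by_cases he : e = "D-"
    · have : ¬ (c = 0) := by omega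
      simp [mlF, he, this, ih (c + 1) (by omega)]
    · simp [mlF, he, show ¬ (e == "D-") = true by simpa using he]

-- mlF 0 passes a run of equal non-'D-' elements through unchanged
theorem mlF_run (xs : List String) (x : String) (hx : x ≠ "D-") :
    mlF 0 xs = xs.takeWhile (· == x) ++ mlF 0 (xs.dropWhile (· == x)) := by
  induction xs with
  | nil => simp
  | cons y ys ih =>
    by_cases hy : y = x
    · subst hy
      simp [mlF, hx, ih]
    · simp [show ¬ (y == x) = true by simpa using hy]

theorem mlInnerB_eq_mlF (l : List String) : mlInnerB l = mlF 0 l := by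
  induction l using mlInnerB.induct with
  | case1 => simp [mlInnerB, mlF]
  | case2 x xs ih =>
    by_cases hx : x = "D-"
    · subst hx
      rw [mlInnerB, if_pos rfl, ih]
      simp [mlF, mlF_pos xs 1 (by omega)]
    · rw [mlInnerB, if_neg hx, ih]
      simp [mlF, hx, mlF_run xs x hx]

theorem inner_eq (l : List String) : mlInnerA l = mlInnerB l := by
  rw [mlInnerB_eq_mlF, mlInnerA, mlFoldA l 0 []]
  simp

-- ===== VERDICT (by name: the statement is the Claim_ definition above) =====
theorem modify_list_spec : Claim_equal_modify_list := by
  intro lst _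
  unfold Spec_modify_list modify_list modify_list_alt
  simp [inner_eq]
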